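-- pv_equiv track=rewrite | github.com/7h3a5p13/Python-Projects | PNFO-v3.py | calculate
-- ===== SOURCE A (Python) =====
-- def calculate( num ):
--     # Assumes that num is prime until it figures out it isn't.
--     prime = True
--     # List for keeping track of factors (beside 1 and num).
--     factors = []
--     # Try every number between 2 and num to check if num is prime or not.
--     for i in range( 2, num ):
--         # If i is a factor, add it to the list and set prime to False.
--         if ( num % i == 0 ):
--             prime = False
--             factors.append( i )
--     # If num is prime...
--     if prime:
--         return 'PRIME', factors
--     # Else...
--     return 'NOT PRIME', factors
-- ===== SOURCE B (Python) =====
-- def calculate(num):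
--     # Trial division up to sqrt(num): collect small divisors and their cofactors.
--     small = []
--     large = []
--     i = 2
--     while i * i <= num:
--         if num % i == 0:
--             small.append(i)
--             j = num // i
--             if j != i:
--                 large.append(j)
--         i += 1
--     factors = small + large[::-1]
--     return ('PRIME' if not factors else 'NOT PRIME'), factors
-- ===== Notes on version B (the rewrite author's own statement) =====
-- stated objective: faster
-- what changed: Replaced the linear scan of every i in range(2, num) by trial division up to sqrt(num), collecting each small divisor together with its cofactor and concatenating the reversed cofactor list to keep ascending order.
import Mathlib
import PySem

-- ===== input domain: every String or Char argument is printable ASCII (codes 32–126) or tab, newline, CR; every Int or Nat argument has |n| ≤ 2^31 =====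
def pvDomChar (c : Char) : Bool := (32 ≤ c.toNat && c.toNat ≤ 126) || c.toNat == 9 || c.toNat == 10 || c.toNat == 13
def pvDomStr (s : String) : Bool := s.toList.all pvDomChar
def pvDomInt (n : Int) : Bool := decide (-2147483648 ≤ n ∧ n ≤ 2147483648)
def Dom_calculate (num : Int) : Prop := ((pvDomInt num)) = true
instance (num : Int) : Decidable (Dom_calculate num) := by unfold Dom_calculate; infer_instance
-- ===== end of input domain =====

-- B replaces A's linear scan of range(2, num) by trial division up to √num (divisor/cofactor pairs,
-- cofactors reversed to keep the list ascending); objective: faster (asymptotic, O(√n) vs O(n)).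

-- ===== PORT A =====
def calculate (num : Int) : String × List Int :=
  let st := (PySem.List.pyRange 2 num 1).foldl
    (fun (st : Bool × List Int) i =>
      if PySem.Int.mod num i == 0 then (false, st.2 ++ [i]) else st)
    (true, [])
  if st.1 then ("PRIME", st.2) else ("NOT PRIME", st.2)

-- ===== PORT B =====
-- the while-loop of Source B: state (small, large), runs while i*i <= num;
-- fuel bounds the number of iterations (chosen large enough below) so the
-- recursion is structural
def altLoop (fuel : Nat) (num i : Int) (small large : List Int) : List Int × List Int :=
  match fuel with
  | 0 => (small, large)
  | fuel + 1 =>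
    if i * i ≤ num then
      if PySem.Int.mod num i == 0 then
        if PySem.Int.floordiv num i ≠ i then
          altLoop fuel num (i + 1) (small ++ [i]) (large ++ [PySem.Int.floordiv num i])
        else
          altLoop fuel num (i + 1) (small ++ [i]) large
      else altLoop fuel num (i + 1) small large
    else (small, large)

def calculate_alt (num : Int) : String × List Int :=
  let p := altLoop ((num - 1).toNat + 1) num 2 [] []
  let factors := p.1 ++ p.2.reverse
  ((if factors.isEmpty then "PRIME" else "NOT PRIME"), factors)

-- ===== PRECONDITION & SPEC =====
def Spec_calculate (num : Int) (out : String × List Int) : Prop := out = calculate_alt num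
instance (num : Int) (out : String × List Int) : Decidable (Spec_calculate num out) := by unfold Spec_calculate; infer_instance

-- ===== CLAIM (what is proved, stated in full; the proofs are below) =====
def Claim_equal_calculate : Prop := ∀ (num : Int), Dom_calculate num → Spec_calculate num (calculate num)

-- ===== LEMMAS AND PROOFS =====

-- the list of proper factors of num found by A's scan
def pvD (num : Int) : List Int :=
  (PySem.List.pyRange 2 num 1).filter (fun i => PySem.Int.mod num i == 0)

lemma foldA (num : Int) (l : List Int) (b : Bool) (acc : List Int) :
    l.foldl (fun (st : Bool × List Int) i =>
        if PySem.Int.mod num i == 0 then (false, st.2 ++ [i]) else st) (b, acc)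
      = (b && (l.filter (fun i => PySem.Int.mod num i == 0)).isEmpty,
         acc ++ l.filter (fun i => PySem.Int.mod num i == 0)) := by
  induction l generalizing b acc with
  | nil => simp
  | cons a t ih =>
    simp only [List.foldl_cons, List.filter_cons]
    by_cases h : (PySem.Int.mod num a == 0) = true
    · rw [if_pos h, if_pos h, ih]
      simp
    · rw [if_neg h, if_neg h, ih]

lemma calculate_eq (num : Int) :
    calculate num = ((if (pvD num).isEmpty then "PRIME" else "NOT PRIME"), pvD num) := by
  unfold calculate pvD
  rw [foldA]
  by_cases h : ((PySem.List.pyRange 2 num 1).filter (fun i => PySem.Int.mod num i == 0)).isEmpty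
  · simp [h]
  · simp [h]

lemma floordiv_mul (num d : Int) (hd : 0 < d) (hdvd : d ∣ num) :
    d * PySem.Int.floordiv num d = num := by
  rw [PySem.Int.floordiv_eq_ediv_of_pos hd]
  exact Int.mul_ediv_cancel' hdvd

-- invariant of Source B's while-loop
lemma altLoop_inv (num : Int) : ∀ (fuel : Nat) (i : Int) (s l : List Int), 2 ≤ i →
    num + 1 - i < fuel →
    ∃ S L, altLoop fuel num i s l = (s ++ S, l ++ L)
      ∧ (∀ d, d ∈ S ↔ i ≤ d ∧ d * d ≤ num ∧ PySem.Int.mod num d = 0)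
      ∧ (∀ d, d ∈ L ↔ ∃ c, i ≤ c ∧ c * c ≤ num ∧ PySem.Int.mod num c = 0 ∧
            PySem.Int.floordiv num c ≠ c ∧ d = PySem.Int.floordiv num c)
      ∧ S.Pairwise (· < ·) ∧ L.Pairwise (· > ·) := by
  intro fuel
  induction fuel with
  | zero =>
    intro i s l hi hf
    have hf' : num + 1 - i < 0 := by exact_mod_cast hf
    refine ⟨[], [], by simp [altLoop], ?_, ?_, List.Pairwise.nil, List.Pairwise.nil⟩
    · intro d
      simp only [List.not_mem_nil, false_iff]
      rintro ⟨h1, h2, h3⟩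
      nlinarith [hf', mul_nonneg (show (0:ℤ) ≤ d - 2 by omega) (show (0:ℤ) ≤ d by omega)]
    · intro d
      simp only [List.not_mem_nil, false_iff]
      rintro ⟨c, h1, h2, h3, h4, h5⟩
      nlinarith [hf', mul_nonneg (show (0:ℤ) ≤ c - 2 by omega) (show (0:ℤ) ≤ c by omega)]
  | succ fuel ih =>
    intro i s l hi hf
    by_cases hg : i * i ≤ num
    · by_cases hmod : (PySem.Int.mod num i == 0) = true
      · have hmod' : PySem.Int.mod num i = 0 := by simpa using hmod
        have hdvd : i ∣ num := (PySem.Int.mod_eq_zero_iff_dvd num i).1 hmod'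
        have hnum : i * PySem.Int.floordiv num i = num := floordiv_mul num i (by omega) hdvd
        by_cases hne : PySem.Int.floordiv num i ≠ i
        · obtain ⟨S, L, hrec, hmS, hmL, hpS, hpL⟩ :=
            ih (i + 1) (s ++ [i]) (l ++ [PySem.Int.floordiv num i]) (by omega) (by omega)
          refine ⟨i :: S, PySem.Int.floordiv num i :: L, ?_, ?_, ?_, ?_, ?_⟩
          · rw [altLoop]
            simp only [if_pos hg, if_pos hmod, if_pos hne, hrec]
            simp
          · intro d
            simp only [List.mem_cons, hmS]
            constructor
            · rintro (rfl | ⟨h1, h2, h3⟩)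
              · exact ⟨le_refl _, hg, hmod'⟩
              · exact ⟨by omega, h2, h3⟩
            · rintro ⟨h1, h2, h3⟩
              rcases eq_or_lt_of_le h1 with h | h
              · exact Or.inl h.symm
              · exact Or.inr ⟨by omega, h2, h3⟩
          · intro d
            simp only [List.mem_cons, hmL]
            constructor
            · rintro (rfl | ⟨c, h1, h2, h3, h4, h5⟩)
              · exact ⟨i, le_refl _, hg, hmod', hne, rfl⟩
              · exact ⟨c, by omega, h2, h3, h4, h5⟩
            · rintro ⟨c, h1, h2, h3, h4, h5⟩
              rcases eq_or_lt_of_le h1 with h | h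
              · subst h
                exact Or.inl h5
              · exact Or.inr ⟨c, by omega, h2, h3, h4, h5⟩
          · refine List.pairwise_cons.2 ⟨?_, hpS⟩
            intro a ha
            have := (hmS a).1 ha
            omega
          · refine List.pairwise_cons.2 ⟨?_, hpL⟩
            intro b hb
            obtain ⟨c, h1, h2, h3, h4, h5⟩ := (hmL b).1 hb
            have hc : c ∣ num := (PySem.Int.mod_eq_zero_iff_dvd num c).1 h3
            have hbc : c * b = num := by
              rw [h5]; exact floordiv_mul num c (by omega) hc
            have hcb : c ≤ b := by nlinarith
            -- i < c ≤ b and i * j = num = c * b ⇒ b < j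
            nlinarith
        · have heq : PySem.Int.floordiv num i = i := by simpa using hne
          obtain ⟨S, L, hrec, hmS, hmL, hpS, hpL⟩ :=
            ih (i + 1) (s ++ [i]) l (by omega) (by omega)
          refine ⟨i :: S, L, ?_, ?_, ?_, ?_, hpL⟩
          · rw [altLoop]
            simp only [if_pos hg, if_pos hmod, if_neg hne, hrec]
            simp
          · intro d
            simp only [List.mem_cons, hmS]
            constructor
            · rintro (rfl | ⟨h1, h2, h3⟩)
              · exact ⟨le_refl _, hg, hmod'⟩
              · exact ⟨by omega, h2, h3⟩
            · rintro ⟨h1, h2, h3⟩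
              rcases eq_or_lt_of_le h1 with h | h
              · exact Or.inl h.symm
              · exact Or.inr ⟨by omega, h2, h3⟩
          · intro d
            rw [hmL]
            constructor
            · rintro ⟨c, h1, h2, h3, h4, h5⟩
              exact ⟨c, by omega, h2, h3, h4, h5⟩
            · rintro ⟨c, h1, h2, h3, h4, h5⟩
              rcases eq_or_lt_of_le h1 with h | h
              · exact absurd (h ▸ heq) (h ▸ h4)
              · exact ⟨c, by omega, h2, h3, h4, h5⟩
          · refine List.pairwise_cons.2 ⟨?_, hpS⟩
            intro a ha
            have := (hmS a).1 ha
            omega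
      · have hmod' : ¬ PySem.Int.mod num i = 0 := by simpa using hmod
        obtain ⟨S, L, hrec, hmS, hmL, hpS, hpL⟩ := ih (i + 1) s l (by omega) (by omega)
        refine ⟨S, L, ?_, ?_, ?_, hpS, hpL⟩
        · rw [altLoop]
          simp only [if_pos hg, if_neg hmod, hrec]
        · intro d
          rw [hmS]
          constructor
          · rintro ⟨h1, h2, h3⟩; exact ⟨by omega, h2, h3⟩
          · rintro ⟨h1, h2, h3⟩
            rcases eq_or_lt_of_le h1 with h | h
            · exact absurd (h ▸ h3) hmod'
            · exact ⟨by omega, h2, h3⟩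
        · intro d
          rw [hmL]
          constructor
          · rintro ⟨c, h1, h2, h3, h4, h5⟩; exact ⟨c, by omega, h2, h3, h4, h5⟩
          · rintro ⟨c, h1, h2, h3, h4, h5⟩
            rcases eq_or_lt_of_le h1 with h | h
            · exact absurd (h ▸ h3) hmod'
            · exact ⟨c, by omega, h2, h3, h4, h5⟩
    · refine ⟨[], [], by rw [altLoop]; simp [if_neg hg], ?_, ?_,
        List.Pairwise.nil, List.Pairwise.nil⟩
      · intro d
        simp only [List.not_mem_nil, false_iff]
        rintro ⟨h1, h2, h3⟩
        have : i * i ≤ d * d := by nlinarith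
        omega
      · intro d
        simp only [List.not_mem_nil, false_iff]
        rintro ⟨c, h1, h2, h3, h4, h5⟩
        have : i * i ≤ c * c := by nlinarith
        omega

-- the concatenated result of B equals A's factor list
lemma alt_factors_eq (num : Int) :
    (altLoop ((num - 1).toNat + 1) num 2 [] []).1 ++
      (altLoop ((num - 1).toNat + 1) num 2 [] []).2.reverse = pvD num := by
  obtain ⟨S, L, hrec, hmS, hmL, hpS, hpL⟩ :=
    altLoop_inv num ((num - 1).toNat + 1) 2 [] [] (le_refl 2) (by omega)
  rw [hrec]
  simp only [List.nil_append]
  set R : List Int := S ++ L.reverse with hR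
  -- membership characterisation of pvD
  have hmD : ∀ d, d ∈ pvD num ↔ 2 ≤ d ∧ d < num ∧ PySem.Int.mod num d = 0 := by
    intro d
    simp only [pvD, List.mem_filter, PySem.List.mem_pyRange_one, beq_iff_eq]
    tauto
  -- membership characterisation of R
  have hmR : ∀ d, d ∈ R ↔ 2 ≤ d ∧ d < num ∧ PySem.Int.mod num d = 0 := by
    intro d
    rw [hR, List.mem_append, List.mem_reverse, hmS, hmL]
    constructor
    · rintro (⟨h1, h2, h3⟩ | ⟨c, h1, h2, h3, h4, h5⟩)
      · exact ⟨h1, by nlinarith, h3⟩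
      · have hc : c ∣ num := (PySem.Int.mod_eq_zero_iff_dvd num c).1 h3
        have hq : c * d = num := by rw [h5]; exact floordiv_mul num c (by omega) hc
        have hcd : c ≤ d := by nlinarith
        exact ⟨by omega, by nlinarith,
          (PySem.Int.mod_eq_zero_iff_dvd num d).2 ⟨c, by linarith [mul_comm c d]⟩⟩
    · rintro ⟨h1, h2, h3⟩
      have hd : d ∣ num := (PySem.Int.mod_eq_zero_iff_dvd num d).1 h3
      by_cases hsq : d * d ≤ num
      · exact Or.inl ⟨h1, hsq, h3⟩
      · push_neg at hsq
        obtain ⟨k, hk⟩ := hd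
        have hk1 : 1 ≤ k := by nlinarith
        have hk2 : 2 ≤ k := by
          rcases eq_or_lt_of_le hk1 with h | h
          · exfalso; rw [← h] at hk; omega
          · omega
        have hkd : k < d := by nlinarith
        have hkdvd : k ∣ num := ⟨d, by linarith [mul_comm d k]⟩
        have hq2 : k * PySem.Int.floordiv num k = num := floordiv_mul num k (by omega) hkdvd
        have hfd : PySem.Int.floordiv num k = d :=
          mul_left_cancel₀ (show (k : ℤ) ≠ 0 by omega) (hq2.trans (by rw [hk, mul_comm]))
        exact Or.inr ⟨k, hk2, by nlinarith,
          (PySem.Int.mod_eq_zero_iff_dvd num k).2 hkdvd, by rw [hfd]; omega, hfd.symm⟩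
  -- both are strictly sorted
  have hpD : (pvD num).Pairwise (· < ·) :=
    List.Pairwise.filter _ (PySem.List.pairwise_lt_pyRange_one 2 num)
  have hpR : R.Pairwise (· < ·) := by
    rw [hR, List.pairwise_append]
    refine ⟨hpS, List.pairwise_reverse.2 hpL, ?_⟩
    intro a ha b hb
    rw [List.mem_reverse] at hb
    obtain ⟨h1, h2, h3⟩ := (hmS a).1 ha
    obtain ⟨c, g1, g2, g3, g4, g5⟩ := (hmL b).1 hb
    have hc : c ∣ num := (PySem.Int.mod_eq_zero_iff_dvd num c).1 g3
    have hq : c * b = num := g5 ▸ floordiv_mul num c (by omega) hc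
    have hcb : c ≤ b := by nlinarith
    have hcb' : c < b := lt_of_le_of_ne hcb (fun h => g4 (by rw [← g5, ← h]))
    nlinarith
  -- strictly sorted lists with the same members are equal
  have hnR : R.Nodup := hpR.nodup
  have hnD : (pvD num).Nodup := hpD.nodup
  have hperm : R.Perm (pvD num) := by
    rw [List.perm_ext_iff_of_nodup hnR hnD]
    intro d; rw [hmR, hmD]
  exact List.eq_of_perm_of_sorted
    (fun a b _ _ h1 h2 => absurd h2 (lt_asymm h1)) hpR hpD hperm

-- ===== VERDICT (by name: the statement is the Claim_ definition above) =====
theorem calculate_spec : Claim_equal_calculate := by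
  intro num _
  unfold Spec_calculate
  rw [calculate_eq]
  simp only [calculate_alt]
  rw [alt_factors_eq]
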